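-- pv_equiv track=rewrite | github.com/thcborges/CompCEDERJ-PIG | AD1/WordList.py | lists_generate
-- ===== SOURCE A (Python) =====
-- FOUR = 4
--
-- FIVE = 5
--
-- def lists_generate(list):
--     list_four, list_five = [], []
--     for word in list:
--         if len(word) == FOUR:
--             list_four.append(word)
--         elif len(word) == FIVE:
--             list_five.append(word)
--
--     return list_four, list_five
-- ===== SOURCE B (Python) =====
-- FOUR = 4
--
-- FIVE = 5
--
-- def lists_generate(list):
--     return ([w for w in list if len(w) == FOUR],
--             [w for w in list if len(w) == FIVE])
-- ===== Notes on version B (the rewrite author's own statement) =====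
-- stated objective: simpler
-- what changed: Replaces the single accumulator loop with if/elif appends by two independent filter comprehensions, one per target length.
import Mathlib
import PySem

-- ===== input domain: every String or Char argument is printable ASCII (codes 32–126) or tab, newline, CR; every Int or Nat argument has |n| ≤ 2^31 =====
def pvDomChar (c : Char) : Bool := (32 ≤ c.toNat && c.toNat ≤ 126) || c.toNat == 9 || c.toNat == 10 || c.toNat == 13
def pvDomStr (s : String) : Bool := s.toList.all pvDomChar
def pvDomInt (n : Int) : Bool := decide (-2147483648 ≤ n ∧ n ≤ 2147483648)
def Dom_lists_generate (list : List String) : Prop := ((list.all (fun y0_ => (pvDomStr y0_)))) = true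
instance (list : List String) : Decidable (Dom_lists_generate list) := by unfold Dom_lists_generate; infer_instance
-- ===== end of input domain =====

-- ===== PORT A =====
-- B replaces A's if/elif accumulator loop with two independent filters (objective: simpler).
def lists_generate (list : List String) : List String × List String :=
  list.foldl (fun (acc : List String × List String) word =>
    if PySem.Str.len word = 4 then (acc.1 ++ [word], acc.2)
    else if PySem.Str.len word = 5 then (acc.1, acc.2 ++ [word])
    else acc) ([], [])

-- ===== PORT B =====
def lists_generate_alt (list : List String) : List String × List String :=
  (list.filter (fun w => PySem.Str.len w = 4), list.filter (fun w => PySem.Str.len w = 5))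

-- ===== PRECONDITION & SPEC =====
def Spec_lists_generate (list : List String) (out : List String × List String) : Prop := out = lists_generate_alt list
instance (list : List String) (out : List String × List String) : Decidable (Spec_lists_generate list out) := by unfold Spec_lists_generate; infer_instance

-- ===== CLAIM (what is proved, stated in full; the proofs are below) =====
def Claim_equal_lists_generate : Prop := ∀ (list : List String), Dom_lists_generate list → Spec_lists_generate list (lists_generate list)

-- ===== LEMMAS AND PROOFS =====

-- ===== VERDICT (by name: the statement is the Claim_ definition above) =====
lemma lists_generate_loop (l : List String) (a b : List String) :
    l.foldl (fun (acc : List String × List String) word =>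
      if PySem.Str.len word = 4 then (acc.1 ++ [word], acc.2)
      else if PySem.Str.len word = 5 then (acc.1, acc.2 ++ [word])
      else acc) (a, b)
    = (a ++ l.filter (fun w => PySem.Str.len w = 4),
       b ++ l.filter (fun w => PySem.Str.len w = 5)) := by
  induction l generalizing a b with
  | nil => simp
  | cons w l ih =>
    simp only [List.foldl_cons, List.filter_cons]
    split_ifs with h4 h5 <;> simp_all

-- ===== VERDICT (by name: the statement is the Claim_ definition above) =====
theorem lists_generate_spec : Claim_equal_lists_generate := by
  intro l _
  unfold Spec_lists_generate lists_generate lists_generate_alt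
  simpa using lists_generate_loop l [] []
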